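-- pv_equiv track=rewrite | github.com/markmay/baseball_pbp_post | src/stat_decoding.py | recode
-- ===== SOURCE A (Python) =====
-- def recode(data):
--     result = []
--     i = len(data)
--
--     for i in range(len(data)):
--         c = data[i]
--         if c >= ord('a') and c <= ord('z'):
--             result.append(lower_char_change(c))
--         elif c >= ord('A') and c <= ord('Z'):
--             result.append(upper_char_Change(c))
--         else:
--             result.append(chr(c))
--     return "".join(result)
--
-- def lower_char_change(ch):
--     return char_change(ch, ord('a'))
--
-- def upper_char_Change(ch):
--     return char_change(ch, ord('A'))
--
-- def char_change(ch, base_ch):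
--     return chr((ch - base_ch + 13) % 26 + base_ch)
-- ===== SOURCE B (Python) =====
-- def recode(data):
--     table = {}
--     for base in (ord('a'), ord('A')):
--         for i in range(26):
--             table[base + i] = chr(base + (i + 13) % 26)
--     return "".join(table.get(c, chr(c)) for c in data)
-- ===== Notes on version B (the rewrite author's own statement) =====
-- stated objective: idiomatic
-- what changed: Replaces the per-byte three-way range classification and modular arithmetic with a 52-entry ROT13 dict built once, so the pass is a single table lookup per byte with chr(c) as fallback.
import Mathlib
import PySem

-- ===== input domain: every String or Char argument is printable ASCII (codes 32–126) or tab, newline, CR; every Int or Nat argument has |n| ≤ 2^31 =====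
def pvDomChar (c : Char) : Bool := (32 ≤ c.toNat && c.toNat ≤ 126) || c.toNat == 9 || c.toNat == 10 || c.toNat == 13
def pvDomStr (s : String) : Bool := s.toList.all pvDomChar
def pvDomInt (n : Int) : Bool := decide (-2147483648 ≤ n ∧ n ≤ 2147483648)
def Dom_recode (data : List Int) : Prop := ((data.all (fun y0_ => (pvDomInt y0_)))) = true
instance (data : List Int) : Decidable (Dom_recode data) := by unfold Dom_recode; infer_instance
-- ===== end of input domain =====

set_option maxRecDepth 16384

-- B builds the 52-entry ROT13 table once and does one lookup per byte; A classifies each byte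
-- with range tests and modular arithmetic. Idiomatic restructuring, same O(n) cost.

-- ===== PORT A =====
def charChange (ch base : Int) : String :=
  String.ofList [Char.ofNat (PySem.Int.mod (ch - base + 13) 26 + base).toNat]

def lowerCharChange (ch : Int) : String := charChange ch 97

def upperCharChange (ch : Int) : String := charChange ch 65

def recode (data : List Int) : String :=
  let result := data.foldl (fun acc c =>
    if 97 ≤ c ∧ c ≤ 122 then acc ++ [lowerCharChange c]
    else if 65 ≤ c ∧ c ≤ 90 then acc ++ [upperCharChange c]
    else acc ++ [String.ofList [Char.ofNat c.toNat]]) []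
  PySem.Str.join "" result

-- ===== PORT B =====
def rot13Table : PySem.Dict Int String :=
  ([97, 65] : List Int).foldl (fun t base =>
    (PySem.List.pyRange 0 26 1).foldl (fun t i =>
      t.insert (base + i) (String.ofList [Char.ofNat (base + PySem.Int.mod (i + 13) 26).toNat])) t)
    PySem.Dict.empty

def recode_alt (data : List Int) : String :=
  PySem.Str.join "" (data.map (fun c =>
    (rot13Table.get? c).getD (String.ofList [Char.ofNat c.toNat])))

-- ===== PRECONDITION & SPEC =====
-- Pre_ excludes codes where Python's chr raises ValueError (negative or > 0x10FFFF) and the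
-- surrogate codes 0xD800–0xDFFF, where both programs return the same one-char surrogate string
-- that has no Lean String representation.
def Pre_recode (data : List Int) : Prop :=
  ∀ c ∈ data, 0 ≤ c ∧ c ≤ 1114111 ∧ (c < 55296 ∨ 57343 < c)
instance (data : List Int) : Decidable (Pre_recode data) := by unfold Pre_recode; infer_instance

def pvWitness_recode : List Int := [72, 101, 108, 108, 111, 33]

def Spec_recode (data : List Int) (out : String) : Prop := out = recode_alt data
instance (data : List Int) (out : String) : Decidable (Spec_recode data out) := by unfold Spec_recode; infer_instance

-- ===== CLAIM (what is proved, stated in full; the proofs are below) =====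
def Claim_equal_recode : Prop := ∀ (data : List Int), Dom_recode data → Pre_recode data → Spec_recode data (recode data)

-- ===== LEMMAS AND PROOFS =====

-- A's per-byte output as a function (the three branches of A's loop body).
def aChar (c : Int) : String :=
  if 97 ≤ c ∧ c ≤ 122 then lowerCharChange c
  else if 65 ≤ c ∧ c ≤ 90 then upperCharChange c
  else String.ofList [Char.ofNat c.toNat]

theorem rot13Table_keys : rot13Table.keys =
    [97, 98, 99, 100, 101, 102, 103, 104, 105, 106, 107, 108, 109, 110, 111, 112, 113,
     114, 115, 116, 117, 118, 119, 120, 121, 122,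
     65, 66, 67, 68, 69, 70, 71, 72, 73, 74, 75, 76, 77, 78, 79, 80, 81, 82, 83, 84,
     85, 86, 87, 88, 89, 90] := by decide

theorem table_none (c : Int) (h1 : ¬(97 ≤ c ∧ c ≤ 122)) (h2 : ¬(65 ≤ c ∧ c ≤ 90)) :
    rot13Table.get? c = none := by
  rw [PySem.Dict.get?_eq_none_iff_not_mem_keys, rot13Table_keys]
  simp only [List.mem_cons, List.not_mem_nil, or_false]
  omega

theorem point (c : Int) :
    (rot13Table.get? c).getD (String.ofList [Char.ofNat c.toNat]) = aChar c := by
  unfold aChar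
  by_cases h1 : 97 ≤ c ∧ c ≤ 122
  · obtain ⟨ha, hb⟩ := h1
    simp only [if_pos (And.intro ha hb)]
    interval_cases c <;> decide
  · by_cases h2 : 65 ≤ c ∧ c ≤ 90
    · obtain ⟨ha, hb⟩ := h2
      rw [if_neg h1, if_pos (And.intro ha hb)]
      interval_cases c <;> decide
    · rw [if_neg h1, if_neg h2, table_none c h1 h2]
      rfl

theorem foldl_eq_map (data : List Int) (acc : List String) :
    data.foldl (fun acc c =>
      if 97 ≤ c ∧ c ≤ 122 then acc ++ [lowerCharChange c]
      else if 65 ≤ c ∧ c ≤ 90 then acc ++ [upperCharChange c]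
      else acc ++ [String.ofList [Char.ofNat c.toNat]]) acc = acc ++ data.map aChar := by
  induction data generalizing acc with
  | nil => simp
  | cons c rest ih =>
    simp only [List.foldl_cons, List.map_cons, ih]
    unfold aChar
    split_ifs <;> simp

theorem recode_eq (data : List Int) : recode data = recode_alt data := by
  unfold recode recode_alt
  simp only []
  rw [foldl_eq_map, List.nil_append]
  congr 1
  exact (List.map_congr_left (fun c _ => point c)).symm

-- ===== VERDICT (by name: the statement is the Claim_ definition above) =====
theorem recode_spec : Claim_equal_recode := by
  intro data _ _
  unfold Spec_recode
  exact recode_eq data
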